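-- pv_equiv track=rewrite | github.com/pzheng460/data-quality-agent | src/dq/filters/fineweb.py | _find_duplicate_chars
-- ===== SOURCE A (Python) =====
-- def _find_duplicate_chars(lines: list[str]) -> int:
--     """Count total characters in duplicate lines (matching datatrove's find_duplicates)."""
--     seen: set[str] = set()
--     dup_chars = 0
--     for line in lines:
--         if line in seen:
--             dup_chars += len(line)
--         else:
--             seen.add(line)
--     return dup_chars
-- ===== SOURCE B (Python) =====
-- def _find_duplicate_chars(lines: list[str]) -> int:
--     """Count total characters in duplicate lines (matching datatrove's find_duplicates)."""
--     counts: dict[str, int] = {}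
--     for line in lines:
--         counts[line] = counts.get(line, 0) + 1
--     return sum(len(line) * (count - 1) for line, count in counts.items())
-- ===== Notes on version B (the rewrite author's own statement) =====
-- stated objective: alternative
-- what changed: Replaces the order-sensitive seen-set pass with its membership branch by a tabulate-then-aggregate computation: one pass builds a line->count frequency dict, a second pass over the unique (line, count) pairs sums len(line)*(count-1).
import Mathlib
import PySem

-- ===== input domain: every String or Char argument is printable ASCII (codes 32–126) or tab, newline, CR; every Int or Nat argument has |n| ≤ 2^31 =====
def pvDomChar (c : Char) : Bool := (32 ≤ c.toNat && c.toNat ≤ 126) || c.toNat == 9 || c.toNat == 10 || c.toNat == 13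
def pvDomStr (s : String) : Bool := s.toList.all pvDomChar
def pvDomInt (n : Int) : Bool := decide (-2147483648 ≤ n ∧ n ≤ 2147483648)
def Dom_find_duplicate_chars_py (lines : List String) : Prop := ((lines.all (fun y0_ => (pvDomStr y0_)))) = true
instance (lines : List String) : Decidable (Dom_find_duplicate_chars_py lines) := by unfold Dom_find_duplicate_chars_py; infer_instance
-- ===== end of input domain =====

-- B replaces A's order-sensitive seen-set pass by a frequency-dict tabulation followed by a
-- sum of len(line)*(count-1) over the unique pairs (alternative decomposition, same cost).

-- ===== PORT A =====
def find_duplicate_chars_py (lines : List String) : Int :=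
  (lines.foldl (fun s line =>
      if PySem.Set.contains s.1 line then (s.1, s.2 + PySem.Str.len line)
      else (PySem.Set.add s.1 line, s.2))
    ((PySem.Set.empty : PySem.Set String), (0 : Int))).2

-- ===== PORT B =====
def find_duplicate_chars_py_alt (lines : List String) : Int :=
  let counts : PySem.Dict String Int :=
    lines.foldl (fun d line => d.insert line (d.getD line 0 + 1)) PySem.Dict.empty
  (counts.items.map (fun p => PySem.Str.len p.1 * (p.2 - 1))).sum

-- ===== PRECONDITION & SPEC =====
def Spec_find_duplicate_chars_py (lines : List String) (out : Int) : Prop := out = find_duplicate_chars_py_alt lines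
instance (lines : List String) (out : Int) : Decidable (Spec_find_duplicate_chars_py lines out) := by unfold Spec_find_duplicate_chars_py; infer_instance

-- ===== CLAIM (what is proved, stated in full; the proofs are below) =====
def Claim_equal_find_duplicate_chars_py : Prop := ∀ (lines : List String), Dom_find_duplicate_chars_py lines → Spec_find_duplicate_chars_py lines (find_duplicate_chars_py lines)

-- ===== LEMMAS AND PROOFS =====

-- B's update step is exactly PySem.Dict.modify, so B's dict is Counter(lines)
lemma alt_counts_eq_counter (lines : List String) :
    lines.foldl (fun d line => d.insert line (d.getD line 0 + 1)) PySem.Dict.empty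
      = PySem.Dict.counter lines := by
  rw [PySem.Dict.counter_eq_foldl]
  rfl

-- the sum B computes over a dict's items
def sumDup (d : PySem.Dict String Int) : Int :=
  (d.items.map (fun p => PySem.Str.len p.1 * (p.2 - 1))).sum

-- first component of A's loop state is the running set of lines seen so far
lemma aFold_fst (l : List String) (seen : PySem.Set String) (d : Int) :
    (l.foldl (fun s line =>
        if PySem.Set.contains s.1 line then (s.1, s.2 + PySem.Str.len line)
        else (PySem.Set.add s.1 line, s.2)) (seen, d)).1 = PySem.Set.update seen l := by
  induction l generalizing seen d with
  | nil => rfl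
  | cons x t ih =>
    simp only [List.foldl_cons]
    by_cases h : PySem.Set.contains seen x
    · rw [if_pos h, ih]
      have hadd : PySem.Set.add seen x = seen := by
        simp only [PySem.Set.add, h, if_pos]
      simp [PySem.Set.update, hadd]
    · rw [if_neg h, ih]
      rfl

lemma sumf_replace (l : List (String × Int)) (x : String) (v : Int)
    (hnd : (l.map Prod.fst).Nodup)
    (hm : (x, v) ∈ l) :
    ((l.map (fun p => if p.1 == x then (x, v + 1) else p)).map
        (fun p => PySem.Str.len p.1 * (p.2 - 1))).sum
      = (l.map (fun p => PySem.Str.len p.1 * (p.2 - 1))).sum + PySem.Str.len x := by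
  induction l with
  | nil => simp at hm
  | cons a t ih =>
    obtain ⟨k, w⟩ := a
    simp only [List.map_cons, List.nodup_cons] at hnd
    rcases List.mem_cons.mp hm with hhead | htl
    · have hk := congrArg Prod.fst hhead
      have hw := congrArg Prod.snd hhead
      simp only at hk hw
      subst hk; subst hw
      -- the replaced entry is the head; the tail has no key x
      have htail : (t.map (fun p => if p.1 == x then (x, v + 1) else p)) = t := by
        have hcg : ∀ p ∈ t, (if p.1 == x then (x, v + 1) else p) = id p := by
          intro p hp
          have hne : p.1 ≠ x := fun hpk => hnd.1 (hpk ▸ List.mem_map_of_mem hp)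
          simp [hne]
        rw [List.map_congr_left hcg, List.map_id]
      simp only [List.map_cons, BEq.refl, if_pos, htail, List.sum_cons]
      ring
    · have hkx : (k == x) = false := by
        have hne : k ≠ x := by
          intro he; subst he
          exact hnd.1 (List.mem_map_of_mem htl)
        simp [hne]
      simp only [List.map_cons, hkx, Bool.false_eq_true, if_false, List.sum_cons,
        ih hnd.2 htl]
      ring

-- effect of one counter bump on B's sum
lemma sumDup_modify (d : PySem.Dict String Int) (x : String)
    (hnd : d.keys.Nodup) :
    sumDup (d.modify x 0 (· + 1))
      = sumDup d + (if d.contains x then PySem.Str.len x else 0) := by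
  simp only [PySem.Dict.modify, PySem.Dict.insert, PySem.Dict.getD]
  by_cases h : d.contains x
  · have hs : (d.get? x).isSome := by
      by_contra hc
      have : d.get? x = none := by
        cases hv : d.get? x
        · rfl
        · simp [hv] at hc
      exact absurd h (by simp [(PySem.Dict.get?_eq_none_iff_contains d x).mp this])
    obtain ⟨v, hv⟩ := Option.isSome_iff_exists.mp hs
    have hmem : (x, v) ∈ d.items := PySem.Dict.mem_items_of_get?_eq_some d hv
    simp only [h, if_pos, hv, Option.getD_some, sumDup]
    exact sumf_replace d.items x v (by simpa [PySem.Dict.keys] using hnd) hmem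
  · have hv : d.get? x = none := by
      cases hv : d.get? x with
      | none => rfl
      | some v =>
        exfalso
        apply h
        have := PySem.Dict.mem_items_of_get?_eq_some d hv
        simp only [PySem.Dict.contains, List.any_eq_true]
        exact ⟨(x, v), this, by simp⟩
    simp only [h, Bool.false_eq_true, if_false, hv, Option.getD_none, sumDup, List.map_append,
      List.sum_append, List.map_cons, List.map_nil, List.sum_cons, List.sum_nil]
    ring

-- main induction, from the back of the list
lemma main_eq (lines : List String) :
    find_duplicate_chars_py lines = sumDup (PySem.Dict.counter lines) := by
  induction lines using List.reverseRecOn with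
  | nil => rfl
  | append_singleton l x ih =>
    have hA : find_duplicate_chars_py (l ++ [x])
        = find_duplicate_chars_py l
          + (if PySem.Set.contains (PySem.Set.ofList l) x then PySem.Str.len x else 0) := by
      have hfst := aFold_fst l PySem.Set.empty 0
      simp only [find_duplicate_chars_py, List.foldl_append, List.foldl_cons, List.foldl_nil]
      rcases hfold : List.foldl (fun s line =>
          if PySem.Set.contains s.1 line then (s.1, s.2 + PySem.Str.len line)
          else (PySem.Set.add s.1 line, s.2))
        ((PySem.Set.empty : PySem.Set String), (0 : Int)) l with ⟨s1, s2⟩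
      rw [hfold] at hfst
      have h1 : s1 = PySem.Set.ofList l := hfst
      subst h1
      by_cases hc : PySem.Set.contains (PySem.Set.ofList l) x
      · rw [if_pos hc, if_pos hc]
      · rw [if_neg hc, if_neg hc]
        simp
    have hB : PySem.Dict.counter (l ++ [x]) = (PySem.Dict.counter l).modify x 0 (· + 1) := by
      rw [PySem.Dict.counter_eq_foldl, PySem.Dict.counter_eq_foldl, List.foldl_append]
      rfl
    rw [hA, hB, sumDup_modify _ _ (PySem.Dict.nodup_keys_counter l), ih]
    congr 1
    rw [PySem.Dict.contains_counter]
    simp only [PySem.Set.contains]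
    by_cases hm : x ∈ l
    · simp [hm, (PySem.Set.mem_ofList l x).mpr hm]
    · have : x ∉ PySem.Set.ofList l := fun hc => hm ((PySem.Set.mem_ofList l x).mp hc)
      simp [hm, this]

-- ===== VERDICT (by name: the statement is the Claim_ definition above) =====
theorem find_duplicate_chars_py_spec : Claim_equal_find_duplicate_chars_py := by
  intro lines _
  unfold Spec_find_duplicate_chars_py
  rw [main_eq]
  simp only [find_duplicate_chars_py_alt, alt_counts_eq_counter]
  rfl
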